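-- pv_equiv track=rewrite | github.com/nickodell/lc3-cc | compile.py | load_register_fp_rel
-- ===== SOURCE A (Python) =====
-- def asm(arg): return [arg + "\n"]
--
-- def within_6bit_twos_complement(n):
--     return -(2**5) <= n <= (2**5)-1
--
-- def load_register_fp_rel(dest_reg, fp_offset, comment=""):
--     a = []
--     source_reg = 5
--     while not within_6bit_twos_complement(fp_offset):
--         if fp_offset > 0:
--             a += asm("ADD R%d, R%d, #15" % (dest_reg, source_reg))
--             fp_offset -= 15
--         else:
--             a += asm("ADD R%d, R%d, #-16" % (dest_reg, source_reg))
--             fp_offset += 16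
--         source_reg = dest_reg
--     a += asm("LDR R%d, R%d, #%d%s" % (dest_reg, source_reg, fp_offset, comment))
--     return a
-- ===== SOURCE B (Python) =====
-- def load_register_fp_rel(dest_reg, fp_offset, comment=""):
--     # closed form: number of adjustment steps k instead of a while loop
--     if fp_offset > 31:
--         step, k = 15, -((31 - fp_offset) // 15)
--     elif fp_offset < -32:
--         step, k = -16, -((fp_offset + 32) // 16)
--     else:
--         step, k = 0, 0
--     lines = ["ADD R%d, R%d, #%d\n" % (dest_reg, 5 if i == 0 else dest_reg, step)
--              for i in range(k)]
--     residual = fp_offset - step * k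
--     src = 5 if k == 0 else dest_reg
--     lines.append("LDR R%d, R%d, #%d%s\n" % (dest_reg, src, residual, comment))
--     return lines
-- ===== Notes on version B (the rewrite author's own statement) =====
-- stated objective: alternative
-- what changed: Replaces A's while loop (repeatedly stepping fp_offset by -15/+16 and appending one line per iteration) with a closed-form step count via integer ceiling division, a list comprehension for the ADD lines, and an arithmetically computed residual for the final LDR.
import Mathlib
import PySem

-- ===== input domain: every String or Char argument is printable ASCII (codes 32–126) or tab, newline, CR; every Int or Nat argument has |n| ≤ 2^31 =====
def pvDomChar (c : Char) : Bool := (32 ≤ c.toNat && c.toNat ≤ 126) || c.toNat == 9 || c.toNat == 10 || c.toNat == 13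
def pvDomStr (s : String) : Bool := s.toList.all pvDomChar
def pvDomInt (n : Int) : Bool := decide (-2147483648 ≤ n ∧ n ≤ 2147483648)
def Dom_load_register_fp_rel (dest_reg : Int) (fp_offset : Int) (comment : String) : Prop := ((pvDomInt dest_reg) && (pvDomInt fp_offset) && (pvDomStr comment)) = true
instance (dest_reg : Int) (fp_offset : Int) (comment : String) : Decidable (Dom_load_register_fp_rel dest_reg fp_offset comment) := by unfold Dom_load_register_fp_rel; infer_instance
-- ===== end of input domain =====

-- ===== PORT A =====
-- B replaces A's while loop by a closed-form step count (alternative decomposition; equal output).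
-- helper: Python `asm(arg)` = [arg + "\n"]
def pyAsm (arg : String) : List String := [arg ++ "\n"]

-- helper: within_6bit_twos_complement
def within6 (n : Int) : Bool := decide (-(2^5) ≤ n ∧ n ≤ 2^5 - 1)

-- the while loop of A, with accumulator `a` and mutable fp_offset/source_reg as parameters
def lrfLoop (a : List String) (dest_reg : Int) (fp_offset : Int) (source_reg : Int)
    (comment : String) : List String :=
  if within6 fp_offset = false then
    if fp_offset > 0 then
      lrfLoop (a ++ pyAsm ("ADD R" ++ PySem.Int.toStr dest_reg ++ ", R" ++
          PySem.Int.toStr source_reg ++ ", #15")) dest_reg (fp_offset - 15) dest_reg comment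
    else
      lrfLoop (a ++ pyAsm ("ADD R" ++ PySem.Int.toStr dest_reg ++ ", R" ++
          PySem.Int.toStr source_reg ++ ", #-16")) dest_reg (fp_offset + 16) dest_reg comment
  else
    a ++ pyAsm ("LDR R" ++ PySem.Int.toStr dest_reg ++ ", R" ++ PySem.Int.toStr source_reg ++
        ", #" ++ PySem.Int.toStr fp_offset ++ comment)
termination_by ((fp_offset - 31).toNat + (-32 - fp_offset).toNat)
decreasing_by
  · simp only [within6, decide_eq_false_iff_not, not_and, not_le] at *; omega
  · simp only [within6, decide_eq_false_iff_not, not_and, not_le] at *; omega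

def load_register_fp_rel (dest_reg : Int) (fp_offset : Int) (comment : String) : List String :=
  lrfLoop [] dest_reg fp_offset 5 comment

-- ===== PORT B =====
def load_register_fp_rel_alt (dest_reg : Int) (fp_offset : Int) (comment : String) : List String :=
  let sk : Int × Int :=
    if fp_offset > 31 then (15, -(PySem.Int.floordiv (31 - fp_offset) 15))
    else if fp_offset < -32 then (-16, -(PySem.Int.floordiv (fp_offset + 32) 16))
    else (0, 0)
  let step := sk.1
  let k := sk.2
  let lines := (List.range k.toNat).map (fun i =>
    "ADD R" ++ PySem.Int.toStr dest_reg ++ ", R" ++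
      PySem.Int.toStr (if i = 0 then 5 else dest_reg) ++ ", #" ++ PySem.Int.toStr step ++ "\n")
  let residual := fp_offset - step * k
  let src : Int := if k = 0 then 5 else dest_reg
  lines ++ ["LDR R" ++ PySem.Int.toStr dest_reg ++ ", R" ++ PySem.Int.toStr src ++ ", #" ++
      PySem.Int.toStr residual ++ comment ++ "\n"]

-- ===== PRECONDITION & SPEC =====
def Spec_load_register_fp_rel (dest_reg : Int) (fp_offset : Int) (comment : String) (out : List String) : Prop := out = load_register_fp_rel_alt dest_reg fp_offset comment
instance (dest_reg : Int) (fp_offset : Int) (comment : String) (out : List String) : Decidable (Spec_load_register_fp_rel dest_reg fp_offset comment out) := by unfold Spec_load_register_fp_rel; infer_instance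

-- ===== CLAIM (what is proved, stated in full; the proofs are below) =====
def Claim_equal_load_register_fp_rel : Prop := ∀ (dest_reg : Int) (fp_offset : Int) (comment : String), Dom_load_register_fp_rel dest_reg fp_offset comment → Spec_load_register_fp_rel dest_reg fp_offset comment (load_register_fp_rel dest_reg fp_offset comment)

-- ===== LEMMAS AND PROOFS =====

-- B's body generalized over the initial source register (5 in B itself)
def specB (dest_reg : Int) (fp_offset : Int) (src0 : Int) (comment : String) : List String :=
  let sk : Int × Int :=
    if fp_offset > 31 then (15, -(PySem.Int.floordiv (31 - fp_offset) 15))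
    else if fp_offset < -32 then (-16, -(PySem.Int.floordiv (fp_offset + 32) 16))
    else (0, 0)
  let step := sk.1
  let k := sk.2
  let lines := (List.range k.toNat).map (fun i =>
    "ADD R" ++ PySem.Int.toStr dest_reg ++ ", R" ++
      PySem.Int.toStr (if i = 0 then src0 else dest_reg) ++ ", #" ++ PySem.Int.toStr step ++ "\n")
  let residual := fp_offset - step * k
  let src : Int := if k = 0 then src0 else dest_reg
  lines ++ ["LDR R" ++ PySem.Int.toStr dest_reg ++ ", R" ++ PySem.Int.toStr src ++ ", #" ++
      PySem.Int.toStr residual ++ comment ++ "\n"]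

theorem alt_eq_specB (d fp : Int) (c : String) :
    load_register_fp_rel_alt d fp c = specB d fp 5 c := rfl

theorem specB_in_range (d fp s : Int) (c : String) (h : -32 ≤ fp ∧ fp ≤ 31) :
    specB d fp s c =
      ["LDR R" ++ PySem.Int.toStr d ++ ", R" ++ PySem.Int.toStr s ++ ", #" ++
        PySem.Int.toStr fp ++ c ++ "\n"] := by
  simp only [specB]
  rw [if_neg (by omega), if_neg (by omega)]
  simp

theorem specB_step_pos (d fp s : Int) (c : String) (h : fp > 31) :
    specB d fp s c =
      ("ADD R" ++ PySem.Int.toStr d ++ ", R" ++ PySem.Int.toStr s ++ ", #15\n") ::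
        specB d (fp - 15) d c := by
  have h15 : PySem.Int.floordiv (31 - fp) 15 = (31 - fp) / 15 :=
    PySem.Int.floordiv_eq_ediv_of_pos (by norm_num)
  by_cases h' : fp - 15 > 31
  · have h15' : PySem.Int.floordiv (31 - (fp - 15)) 15 = (31 - (fp - 15)) / 15 :=
      PySem.Int.floordiv_eq_ediv_of_pos (by norm_num)
    have hk : -(PySem.Int.floordiv (31 - fp) 15) =
        -(PySem.Int.floordiv (31 - (fp - 15)) 15) + 1 := by rw [h15, h15']; omega
    have hk1 : (1:Int) ≤ -(PySem.Int.floordiv (31 - fp) 15) := by rw [h15]; omega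
    simp only [specB]
    rw [if_pos h, if_pos h']
    simp only []
    have htn : (-(PySem.Int.floordiv (31 - fp) 15)).toNat =
        (-(PySem.Int.floordiv (31 - (fp - 15)) 15)).toNat + 1 := by omega
    rw [htn, List.range_succ_eq_map, List.map_cons, List.map_map]
    simp only [Function.comp_def, Nat.succ_ne_zero, ite_self, reduceIte, List.cons_append,
      String.append_assoc]
    rw [if_neg (by omega), hk]
    rw [show fp - 15 * (-(PySem.Int.floordiv (31 - (fp - 15)) 15) + 1)
          = fp - 15 - 15 * -(PySem.Int.floordiv (31 - (fp - 15)) 15) from by ring]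
    rw [show (", #" ++ (PySem.Int.toStr (15:Int) ++ "\n") : String) = ", #15\n" from by decide]
  · have hk : -(PySem.Int.floordiv (31 - fp) 15) = 1 := by rw [h15]; omega
    simp only [specB]
    rw [if_pos h, if_neg (by omega), if_neg (by omega)]
    rw [hk]
    norm_num [List.range_succ, String.append_assoc]
    rw [show (", #" ++ (PySem.Int.toStr (15:Int) ++ "\n") : String) = ", #15\n" from by decide]
    refine ⟨rfl, ?_⟩
    rw [if_neg (show ¬(fp - 15 < -32) from by omega)]
    simp

theorem specB_step_neg (d fp s : Int) (c : String) (h : fp < -32) :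
    specB d fp s c =
      ("ADD R" ++ PySem.Int.toStr d ++ ", R" ++ PySem.Int.toStr s ++ ", #-16\n") ::
        specB d (fp + 16) d c := by
  have h16 : PySem.Int.floordiv (fp + 32) 16 = (fp + 32) / 16 :=
    PySem.Int.floordiv_eq_ediv_of_pos (by norm_num)
  by_cases h' : fp + 16 < -32
  · have h16' : PySem.Int.floordiv ((fp + 16) + 32) 16 = ((fp + 16) + 32) / 16 :=
      PySem.Int.floordiv_eq_ediv_of_pos (by norm_num)
    have hk : -(PySem.Int.floordiv (fp + 32) 16) =
        -(PySem.Int.floordiv ((fp + 16) + 32) 16) + 1 := by rw [h16, h16']; omega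
    simp only [specB]
    rw [if_neg (by omega), if_pos h, if_neg (by omega), if_pos h']
    simp only []
    have htn : (-(PySem.Int.floordiv (fp + 32) 16)).toNat =
        (-(PySem.Int.floordiv ((fp + 16) + 32) 16)).toNat + 1 := by omega
    rw [htn, List.range_succ_eq_map, List.map_cons, List.map_map]
    simp only [Function.comp_def, Nat.succ_ne_zero, ite_self, reduceIte, List.cons_append,
      String.append_assoc]
    rw [if_neg (by omega), hk]
    rw [show fp - -16 * (-(PySem.Int.floordiv (fp + 16 + 32) 16) + 1)
          = fp + 16 - -16 * -(PySem.Int.floordiv (fp + 16 + 32) 16) from by ring]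
    rw [show (", #" ++ (PySem.Int.toStr (-16:Int) ++ "\n") : String) = ", #-16\n" from by decide]
  · have hk : -(PySem.Int.floordiv (fp + 32) 16) = 1 := by rw [h16]; omega
    simp only [specB]
    rw [if_neg (by omega), if_pos h, if_neg (by omega), if_neg (by omega)]
    rw [hk]
    norm_num [List.range_succ, String.append_assoc]
    rw [show (", #" ++ (PySem.Int.toStr (-16:Int) ++ "\n") : String) = ", #-16\n" from by decide]
    refine ⟨rfl, ?_⟩
    rw [if_neg (show ¬(fp + 16 < -32) from by omega)]
    simp

theorem loop_eq_specB (d : Int) (c : String) :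
    ∀ (n : Nat) (fp : Int), (fp - 31).toNat + (-32 - fp).toNat ≤ n →
      ∀ (s : Int) (a : List String), lrfLoop a d fp s c = a ++ specB d fp s c := by
  intro n
  induction n with
  | zero =>
    intro fp hfp s a
    have hin : -32 ≤ fp ∧ fp ≤ 31 := by omega
    rw [lrfLoop, if_neg (by simp only [within6, decide_eq_false_iff_not, not_not]; omega), specB_in_range d fp s c hin]
    simp [pyAsm]
  | succ m ih =>
    intro fp hfp s a
    by_cases hin : -32 ≤ fp ∧ fp ≤ 31
    · rw [lrfLoop, if_neg (by simp only [within6, decide_eq_false_iff_not, not_not]; omega), specB_in_range d fp s c hin]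
      simp [pyAsm]
    · rw [lrfLoop, if_pos (by simp only [within6, decide_eq_false_iff_not]; omega)]
      by_cases hpos : fp > 0
      · rw [if_pos hpos, ih (fp - 15) (by omega) d _,
          specB_step_pos d fp s c (by omega)]
        simp only [pyAsm, String.append_assoc, List.append_assoc, List.singleton_append]
        rw [show (", #15" ++ "\n" : String) = ", #15\n" from by decide]
      · rw [if_neg hpos, ih (fp + 16) (by omega) d _,
          specB_step_neg d fp s c (by omega)]
        simp only [pyAsm, String.append_assoc, List.append_assoc, List.singleton_append]
        rw [show (", #-16" ++ "\n" : String) = ", #-16\n" from by decide]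

-- ===== VERDICT (by name: the statement is the Claim_ definition above) =====
theorem load_register_fp_rel_spec : Claim_equal_load_register_fp_rel := by
  intro d fp c _
  unfold Spec_load_register_fp_rel load_register_fp_rel
  rw [loop_eq_specB d c ((fp - 31).toNat + (-32 - fp).toNat) fp le_rfl 5 [],
    alt_eq_specB]
  simp
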